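-- pv_equiv track=rewrite | github.com/pyrosoda/planner_of_plana | BA Planner/v6/core/planning_calc.py | _calculate_single_stat_cost
-- ===== SOURCE A (Python) =====
-- STAT_WORKBOOK_NAME = "Item_Icon_WorkBook_PotentialMaxHP"
--
-- _STAT_LEVEL_COSTS: tuple[dict[str, int], ...] = (
--     {"credits": 0, "workbook": 0, "main_t1": 0, "main_t2": 0},
--     {"credits": 100_000, "workbook": 2, "main_t1": 10, "main_t2": 0},
--     {"credits": 100_000, "workbook": 2, "main_t1": 10, "main_t2": 0},
--     {"credits": 100_000, "workbook": 2, "main_t1": 10, "main_t2": 0},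
--     {"credits": 100_000, "workbook": 2, "main_t1": 10, "main_t2": 0},
--     {"credits": 100_000, "workbook": 2, "main_t1": 10, "main_t2": 0},
--     {"credits": 100_000, "workbook": 2, "main_t1": 15, "main_t2": 0},
--     {"credits": 100_000, "workbook": 2, "main_t1": 15, "main_t2": 0},
--     {"credits": 100_000, "workbook": 2, "main_t1": 15, "main_t2": 0},
--     {"credits": 100_000, "workbook": 2, "main_t1": 15, "main_t2": 0},
--     {"credits": 100_000, "workbook": 2, "main_t1": 15, "main_t2": 0},
--     {"credits": 100_000, "workbook": 2, "main_t1": 20, "main_t2": 0},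
--     {"credits": 100_000, "workbook": 2, "main_t1": 20, "main_t2": 0},
--     {"credits": 100_000, "workbook": 2, "main_t1": 20, "main_t2": 0},
--     {"credits": 100_000, "workbook": 2, "main_t1": 20, "main_t2": 0},
--     {"credits": 100_000, "workbook": 2, "main_t1": 20, "main_t2": 0},
--     {"credits": 200_000, "workbook": 4, "main_t1": 0, "main_t2": 6},
--     {"credits": 200_000, "workbook": 4, "main_t1": 0, "main_t2": 6},
--     {"credits": 200_000, "workbook": 4, "main_t1": 0, "main_t2": 6},
--     {"credits": 200_000, "workbook": 4, "main_t1": 0, "main_t2": 6},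
--     {"credits": 200_000, "workbook": 4, "main_t1": 0, "main_t2": 6},
--     {"credits": 200_000, "workbook": 4, "main_t1": 0, "main_t2": 8},
--     {"credits": 200_000, "workbook": 4, "main_t1": 0, "main_t2": 8},
--     {"credits": 200_000, "workbook": 4, "main_t1": 0, "main_t2": 8},
--     {"credits": 200_000, "workbook": 4, "main_t1": 0, "main_t2": 8},
--     {"credits": 200_000, "workbook": 4, "main_t1": 0, "main_t2": 8},
-- )
--
-- def _safe_int(value: object, default: int = 0) -> int:
--     try:
--         return int(value or 0)
--     except Exception:
--         return default
--
-- def _add_material_value(total: dict[str, int], name: str | None, tier: int, value: object) -> None: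
--     material_name = (name or "").strip()
--     amount = _safe_int(value, 0)
--     if not material_name or amount <= 0:
--         return
--     key = f"{material_name} T{tier}"
--     total[key] = total.get(key, 0) + amount
--
-- def _calculate_single_stat_cost(
--     main_name: str | None,
--     current_level: int,
--     target_level: int,
-- ) -> tuple[int, dict[str, int]]:
--     materials: dict[str, int] = {}
--     current = min(max(current_level, 0), len(_STAT_LEVEL_COSTS) - 1)
--     target = min(max(target_level, current), len(_STAT_LEVEL_COSTS) - 1)
--     credits = 0
--
--     for level in range(current + 1, target + 1):
--         row = _STAT_LEVEL_COSTS[level]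
--         credits += row["credits"]
--         _add_material_value(materials, STAT_WORKBOOK_NAME, 1, row["workbook"])
--         _add_material_value(materials, main_name, 1, row["main_t1"])
--         _add_material_value(materials, main_name, 2, row["main_t2"])
--
--     return credits, materials
-- ===== SOURCE B (Python) =====
-- STAT_WORKBOOK_NAME = "Item_Icon_WorkBook_PotentialMaxHP"
--
-- _STAT_LEVEL_COSTS: tuple[dict[str, int], ...] = (
--     {"credits": 0, "workbook": 0, "main_t1": 0, "main_t2": 0},
--     {"credits": 100_000, "workbook": 2, "main_t1": 10, "main_t2": 0},
--     {"credits": 100_000, "workbook": 2, "main_t1": 10, "main_t2": 0},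
--     {"credits": 100_000, "workbook": 2, "main_t1": 10, "main_t2": 0},
--     {"credits": 100_000, "workbook": 2, "main_t1": 10, "main_t2": 0},
--     {"credits": 100_000, "workbook": 2, "main_t1": 10, "main_t2": 0},
--     {"credits": 100_000, "workbook": 2, "main_t1": 15, "main_t2": 0},
--     {"credits": 100_000, "workbook": 2, "main_t1": 15, "main_t2": 0},
--     {"credits": 100_000, "workbook": 2, "main_t1": 15, "main_t2": 0},
--     {"credits": 100_000, "workbook": 2, "main_t1": 15, "main_t2": 0},
--     {"credits": 100_000, "workbook": 2, "main_t1": 15, "main_t2": 0},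
--     {"credits": 100_000, "workbook": 2, "main_t1": 20, "main_t2": 0},
--     {"credits": 100_000, "workbook": 2, "main_t1": 20, "main_t2": 0},
--     {"credits": 100_000, "workbook": 2, "main_t1": 20, "main_t2": 0},
--     {"credits": 100_000, "workbook": 2, "main_t1": 20, "main_t2": 0},
--     {"credits": 100_000, "workbook": 2, "main_t1": 20, "main_t2": 0},
--     {"credits": 200_000, "workbook": 4, "main_t1": 0, "main_t2": 6},
--     {"credits": 200_000, "workbook": 4, "main_t1": 0, "main_t2": 6},
--     {"credits": 200_000, "workbook": 4, "main_t1": 0, "main_t2": 6},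
--     {"credits": 200_000, "workbook": 4, "main_t1": 0, "main_t2": 6},
--     {"credits": 200_000, "workbook": 4, "main_t1": 0, "main_t2": 6},
--     {"credits": 200_000, "workbook": 4, "main_t1": 0, "main_t2": 8},
--     {"credits": 200_000, "workbook": 4, "main_t1": 0, "main_t2": 8},
--     {"credits": 200_000, "workbook": 4, "main_t1": 0, "main_t2": 8},
--     {"credits": 200_000, "workbook": 4, "main_t1": 0, "main_t2": 8},
--     {"credits": 200_000, "workbook": 4, "main_t1": 0, "main_t2": 8},
-- )
--
-- def _safe_int(value: object, default: int = 0) -> int: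
--     try:
--         return int(value or 0)
--     except Exception:
--         return default
--
-- def _add_material_value(total: dict[str, int], name: str | None, tier: int, value: object) -> None:
--     material_name = (name or "").strip()
--     amount = _safe_int(value, 0)
--     if not material_name or amount <= 0:
--         return
--     key = f"{material_name} T{tier}"
--     total[key] = total.get(key, 0) + amount
--
-- def _prefix(field: str) -> list[int]:
--     out = [0]
--     for row in _STAT_LEVEL_COSTS:
--         out.append(out[-1] + row[field])
--     return out
--
-- _P_CREDITS = _prefix("credits")
-- _P_WORKBOOK = _prefix("workbook")
-- _P_T1 = _prefix("main_t1")
-- _P_T2 = _prefix("main_t2")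
--
-- def _calculate_single_stat_cost(
--     main_name: str | None,
--     current_level: int,
--     target_level: int,
-- ) -> tuple[int, dict[str, int]]:
--     current = min(max(current_level, 0), len(_STAT_LEVEL_COSTS) - 1)
--     target = min(max(target_level, current), len(_STAT_LEVEL_COSTS) - 1)
--     lo, hi = current + 1, target + 1
--
--     credits = _P_CREDITS[hi] - _P_CREDITS[lo]
--     materials: dict[str, int] = {}
--     _add_material_value(materials, STAT_WORKBOOK_NAME, 1, _P_WORKBOOK[hi] - _P_WORKBOOK[lo])
--     _add_material_value(materials, main_name, 1, _P_T1[hi] - _P_T1[lo])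
--     _add_material_value(materials, main_name, 2, _P_T2[hi] - _P_T2[lo])
--     return credits, materials
-- ===== Notes on version B (the rewrite author's own statement) =====
-- stated objective: alternative
-- what changed: Replaces A's per-level loop over _STAT_LEVEL_COSTS with module-level prefix-sum tables: each total (credits, workbook, main_t1, main_t2) becomes one subtraction prefix[target+1]-prefix[current+1], routed once per material through _add_material_value.
import Mathlib
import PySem

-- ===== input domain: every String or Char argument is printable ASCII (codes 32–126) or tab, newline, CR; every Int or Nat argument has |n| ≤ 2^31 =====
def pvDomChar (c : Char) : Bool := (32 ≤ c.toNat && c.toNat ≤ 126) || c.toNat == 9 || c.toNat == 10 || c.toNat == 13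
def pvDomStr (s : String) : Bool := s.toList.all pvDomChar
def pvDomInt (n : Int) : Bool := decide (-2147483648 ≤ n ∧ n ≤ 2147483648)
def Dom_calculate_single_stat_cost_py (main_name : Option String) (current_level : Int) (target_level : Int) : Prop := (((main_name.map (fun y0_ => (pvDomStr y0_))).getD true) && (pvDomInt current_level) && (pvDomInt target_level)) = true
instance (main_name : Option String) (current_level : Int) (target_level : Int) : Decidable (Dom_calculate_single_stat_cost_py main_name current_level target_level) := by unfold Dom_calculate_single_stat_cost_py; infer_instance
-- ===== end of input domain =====

-- B replaces A's per-level loop by module-level prefix-sum tables: each total is one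
-- subtraction prefix[target+1] - prefix[current+1], routed once through _add_material_value
-- (an alternative table strategy; the level range is at most 25 long, so no speed is claimed).

-- ===== PORT A =====

def pvWB : String := "Item_Icon_WorkBook_PotentialMaxHP"

def pvRow (c w t1 t2 : Int) : PySem.Dict String Int :=
  PySem.Dict.ofList [("credits", c), ("workbook", w), ("main_t1", t1), ("main_t2", t2)]

def pvTable : List (PySem.Dict String Int) :=
  [pvRow 0 0 0 0,
   pvRow 100000 2 10 0, pvRow 100000 2 10 0, pvRow 100000 2 10 0, pvRow 100000 2 10 0, pvRow 100000 2 10 0,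
   pvRow 100000 2 15 0, pvRow 100000 2 15 0, pvRow 100000 2 15 0, pvRow 100000 2 15 0, pvRow 100000 2 15 0,
   pvRow 100000 2 20 0, pvRow 100000 2 20 0, pvRow 100000 2 20 0, pvRow 100000 2 20 0, pvRow 100000 2 20 0,
   pvRow 200000 4 0 6, pvRow 200000 4 0 6, pvRow 200000 4 0 6, pvRow 200000 4 0 6, pvRow 200000 4 0 6,
   pvRow 200000 4 0 8, pvRow 200000 4 0 8, pvRow 200000 4 0 8, pvRow 200000 4 0 8, pvRow 200000 4 0 8]

-- _add_material_value (shared helper of both Pythons).  _safe_int(value, 0) is the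
-- identity on an int argument (int(v or 0) == v), so 'amount' is 'value' itself.
def pvAddMaterial (total : PySem.Dict String Int) (name : Option String) (tier : Int) (value : Int) :
    PySem.Dict String Int :=
  let materialName := PySem.Str.strip (name.getD "")
  let amount := value
  if materialName = "" ∨ amount ≤ 0 then total
  else
    let key := materialName ++ " T" ++ PySem.Int.toStr tier
    total.insert key (total.getD key 0 + amount)

def calculate_single_stat_cost_py (main_name : Option String) (current_level : Int) (target_level : Int) :
    Int × (List (String × Int)) :=
  let materials : PySem.Dict String Int := PySem.Dict.empty
  let current := min (max current_level 0) ((pvTable.length : Int) - 1)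
  let target := min (max target_level current) ((pvTable.length : Int) - 1)
  let res := (PySem.List.pyRange (current + 1) (target + 1) 1).foldl
    (fun st level =>
      match PySem.List.pyGet? pvTable level with
      | none => st  -- unreachable: 'level' is an in-range index by the clamping above
      | some row =>
        let credits := st.1 + row.getD "credits" 0   -- keys are always present, so d[k] = getD
        let m1 := pvAddMaterial st.2 (some pvWB) 1 (row.getD "workbook" 0)
        let m2 := pvAddMaterial m1 main_name 1 (row.getD "main_t1" 0)
        let m3 := pvAddMaterial m2 main_name 2 (row.getD "main_t2" 0)
        (credits, m3))
    ((0 : Int), materials)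
  (res.1, res.2.items)

-- ===== PORT B =====

-- module-level: out = [0]; for row in table: out.append(out[-1] + row[field])
def pvPrefix (field : String) : List Int :=
  pvTable.foldl (fun out row => out ++ [(PySem.List.pyGet? out (-1)).getD 0 + row.getD field 0]) [0]

def calculate_single_stat_cost_py_alt (main_name : Option String) (current_level : Int) (target_level : Int) :
    Int × (List (String × Int)) :=
  let current := min (max current_level 0) ((pvTable.length : Int) - 1)
  let target := min (max target_level current) ((pvTable.length : Int) - 1)
  let lo := current + 1
  let hi := target + 1
  let pAt := fun (f : String) (i : Int) => (PySem.List.pyGet? (pvPrefix f) i).getD 0  -- in-range index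
  let credits := pAt "credits" hi - pAt "credits" lo
  let materials : PySem.Dict String Int := PySem.Dict.empty
  let m1 := pvAddMaterial materials (some pvWB) 1 (pAt "workbook" hi - pAt "workbook" lo)
  let m2 := pvAddMaterial m1 main_name 1 (pAt "main_t1" hi - pAt "main_t1" lo)
  let m3 := pvAddMaterial m2 main_name 2 (pAt "main_t2" hi - pAt "main_t2" lo)
  (credits, m3.items)

-- ===== PRECONDITION & SPEC =====
def Spec_calculate_single_stat_cost_py (main_name : Option String) (current_level : Int) (target_level : Int) (out : Int × (List (String × Int))) : Prop := out = calculate_single_stat_cost_py_alt main_name current_level target_level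
instance (main_name : Option String) (current_level : Int) (target_level : Int) (out : Int × (List (String × Int))) : Decidable (Spec_calculate_single_stat_cost_py main_name current_level target_level out) := by unfold Spec_calculate_single_stat_cost_py; infer_instance

-- ===== CLAIM (what is proved, stated in full; the proofs are below) =====
def Claim_equal_calculate_single_stat_cost_py : Prop := ∀ (main_name : Option String) (current_level : Int) (target_level : Int), Dom_calculate_single_stat_cost_py main_name current_level target_level → Spec_calculate_single_stat_cost_py main_name current_level target_level (calculate_single_stat_cost_py main_name current_level target_level)

-- ===== LEMMAS AND PROOFS =====

-- field extractors of a row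
def pvCr (r : PySem.Dict String Int) : Int := r.getD "credits" 0
def pvWv (r : PySem.Dict String Int) : Int := r.getD "workbook" 0
def pvAv (r : PySem.Dict String Int) : Int := r.getD "main_t1" 0
def pvBv (r : PySem.Dict String Int) : Int := r.getD "main_t2" 0

-- B's dict shape: the three summed _add_material_value calls
def pvA3 (n : Option String) (W S1 S2 : Int) : PySem.Dict String Int :=
  pvAddMaterial (pvAddMaterial (pvAddMaterial PySem.Dict.empty (some pvWB) 1 W) n 1 S1) n 2 S2

-- A's loop body, on the row itself
def pvStep (n : Option String) (st : Int × PySem.Dict String Int) (row : PySem.Dict String Int) :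
    Int × PySem.Dict String Int :=
  (st.1 + pvCr row,
   pvAddMaterial (pvAddMaterial (pvAddMaterial st.2 (some pvWB) 1 (pvWv row)) n 1 (pvAv row)) n 2 (pvBv row))

-- the "t1 phase before t2 phase" shape of (any contiguous slice of) the table
def pvPhased : List (PySem.Dict String Int) → Bool
  | [] => true
  | r :: rest =>
      decide (0 < pvWv r) && decide (0 ≤ pvAv r) && decide (0 ≤ pvBv r) &&
      (!(decide (0 < pvBv r)) || rest.all (fun r' => pvAv r' == 0)) && pvPhased rest

theorem pv_addM_skip (d : PySem.Dict String Int) (n : Option String) (t v : Int)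
    (h : PySem.Str.strip (n.getD "") = "" ∨ v ≤ 0) : pvAddMaterial d n t v = d := by
  unfold pvAddMaterial; simp only []; rw [if_pos h]

theorem pv_addM_ins (d : PySem.Dict String Int) (n : Option String) (t v : Int)
    (h1 : PySem.Str.strip (n.getD "") ≠ "") (h2 : 0 < v) :
    pvAddMaterial d n t v =
      d.insert (PySem.Str.strip (n.getD "") ++ " T" ++ PySem.Int.toStr t)
        (d.getD (PySem.Str.strip (n.getD "") ++ " T" ++ PySem.Int.toStr t) 0 + v) := by
  unfold pvAddMaterial; simp only []
  rw [if_neg]; rintro (h | h); exact h1 h; omega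

-- merge two adds of the same name and tier
theorem pv_addM_merge (d : PySem.Dict String Int) (n : Option String) (t v w : Int)
    (hv : 0 ≤ v) (hw : 0 ≤ w) :
    pvAddMaterial (pvAddMaterial d n t v) n t w = pvAddMaterial d n t (v + w) := by
  by_cases hs : PySem.Str.strip (n.getD "") = ""
  · rw [pv_addM_skip _ _ _ _ (Or.inl hs), pv_addM_skip _ _ _ _ (Or.inl hs),
        pv_addM_skip _ _ _ _ (Or.inl hs)]
  · rcases eq_or_lt_of_le hv with hv0 | hv0
    · rw [pv_addM_skip d n t v (Or.inr (by omega)), ← hv0, zero_add]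
    rcases eq_or_lt_of_le hw with hw0 | hw0
    · rw [pv_addM_skip _ n t w (Or.inr (by omega)), ← hw0, add_zero]
    rw [pv_addM_ins d n t v hs hv0, pv_addM_ins _ n t w hs hw0,
        pv_addM_ins d n t (v + w) hs (by omega)]
    rw [PySem.Dict.getD_insert_self, PySem.Dict.insert_insert_self]
    ring_nf

-- inserts at distinct keys commute when the first key is already present
theorem pv_ins_comm (d : PySem.Dict String Int) (k1 k2 : String) (v1 v2 : Int)
    (hk : k1 ≠ k2) (hc : d.contains k1 = true) :
    (d.insert k1 v1).insert k2 v2 = (d.insert k2 v2).insert k1 v1 := by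
  have hc2L : (d.insert k1 v1).contains k2 = d.contains k2 := by
    rw [PySem.Dict.contains_insert]; simp [hk.symm]
  have hc1R : (d.insert k2 v2).contains k1 = true := by
    rw [PySem.Dict.contains_insert]; simp [hc]
  apply PySem.Dict.ext
  by_cases h2 : d.contains k2 = true
  · have hc2L' : (d.insert k1 v1).contains k2 = true := by rw [hc2L]; exact h2
    rw [PySem.Dict.items_insert_of_contains _ v2 hc2L',
        PySem.Dict.items_insert_of_contains d v1 hc,
        PySem.Dict.items_insert_of_contains _ v1 hc1R,
        PySem.Dict.items_insert_of_contains d v2 h2]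
    simp only [List.map_map]
    apply List.map_congr_left
    intro p _
    simp only [Function.comp]
    by_cases e1 : p.1 = k1 <;> by_cases e2 : p.1 = k2 <;>
      simp_all [beq_iff_eq, hk.symm]
  · have h2' : d.contains k2 = false := by simpa using h2
    have hc2L' : (d.insert k1 v1).contains k2 = false := by rw [hc2L]; exact h2'
    rw [PySem.Dict.items_insert_of_not_contains _ v2 hc2L',
        PySem.Dict.items_insert_of_contains d v1 hc,
        PySem.Dict.items_insert_of_contains _ v1 hc1R,
        PySem.Dict.items_insert_of_not_contains d v2 h2']
    rw [List.map_append]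
    simp [beq_iff_eq, hk.symm]

-- two adds with distinct keys commute when the first key is already present
theorem pv_addM_comm (d : PySem.Dict String Int) (n1 n2 : Option String) (t1 t2 v1 v2 : Int)
    (hk : PySem.Str.strip (n1.getD "") ++ " T" ++ PySem.Int.toStr t1 ≠
          PySem.Str.strip (n2.getD "") ++ " T" ++ PySem.Int.toStr t2)
    (hc : d.contains (PySem.Str.strip (n1.getD "") ++ " T" ++ PySem.Int.toStr t1) = true) :
    pvAddMaterial (pvAddMaterial d n1 t1 v1) n2 t2 v2 =
    pvAddMaterial (pvAddMaterial d n2 t2 v2) n1 t1 v1 := by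
  by_cases h1 : PySem.Str.strip (n1.getD "") = "" ∨ v1 ≤ 0
  · rw [pv_addM_skip d n1 t1 v1 h1, pv_addM_skip _ n1 t1 v1 h1]
  by_cases h2 : PySem.Str.strip (n2.getD "") = "" ∨ v2 ≤ 0
  · rw [pv_addM_skip _ n2 t2 v2 h2, pv_addM_skip d n2 t2 v2 h2]
  rw [not_or] at h1 h2
  have hv1 : 0 < v1 := by omega
  have hv2 : 0 < v2 := by omega
  rw [pv_addM_ins d n1 t1 v1 h1.1 hv1, pv_addM_ins _ n2 t2 v2 h2.1 hv2,
      pv_addM_ins d n2 t2 v2 h2.1 hv2, pv_addM_ins _ n1 t1 v1 h1.1 hv1,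
      PySem.Dict.getD_insert_of_ne _ _ _ (Ne.symm hk), PySem.Dict.getD_insert_of_ne _ _ _ hk,
      pv_ins_comm d _ _ _ _ hk hc]

theorem pv_addM_contains (d : PySem.Dict String Int) (n : Option String) (t v : Int) (k : String)
    (h : d.contains k = true) : (pvAddMaterial d n t v).contains k = true := by
  by_cases hc : PySem.Str.strip (n.getD "") = "" ∨ v ≤ 0
  · rw [pv_addM_skip d n t v hc]; exact h
  · rw [not_or] at hc
    rw [pv_addM_ins d n t v hc.1 (by omega)]
    rw [PySem.Dict.contains_insert]; simp [h]

theorem pv_key_ne_12 (s t : String) : s ++ " T" ++ "1" ≠ t ++ " T" ++ "2" := by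
  intro h
  have h2 : (s ++ " T" ++ "1").toList.getLast? = (t ++ " T" ++ "2").toList.getLast? := by rw [h]
  simp [String.toList_append] at h2

theorem pv_A3_zero (n : Option String) : pvA3 n 0 0 0 = PySem.Dict.empty := by
  unfold pvA3
  rw [pv_addM_skip _ _ _ _ (Or.inr le_rfl), pv_addM_skip _ _ _ _ (Or.inr le_rfl),
      pv_addM_skip _ _ _ _ (Or.inr le_rfl)]

-- one step of A's loop, absorbed into B's three-add shape
theorem pv_stepA3 (n : Option String) (W S1 S2 w a b : Int)
    (hw : 0 < w) (hW : 0 ≤ W) (hS1 : 0 ≤ S1) (hS2 : 0 ≤ S2) (ha : 0 ≤ a) (hb : 0 ≤ b)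
    (h0 : W = 0 → S1 = 0 ∧ S2 = 0) (hx : 0 < a → S2 = 0) :
    pvAddMaterial (pvAddMaterial (pvAddMaterial (pvA3 n W S1 S2) (some pvWB) 1 w) n 1 a) n 2 b
      = pvA3 n (W + w) (S1 + a) (S2 + b) := by
  have hsw : PySem.Str.strip ((some pvWB).getD "") = pvWB := by decide
  by_cases hs : PySem.Str.strip (n.getD "") = ""
  · -- the main-name adds are all skips
    unfold pvA3
    rw [pv_addM_skip _ n 2 S2 (Or.inl hs), pv_addM_skip _ n 1 S1 (Or.inl hs),
        pv_addM_skip _ n 2 b (Or.inl hs), pv_addM_skip _ n 1 a (Or.inl hs),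
        pv_addM_skip _ n 2 (S2 + b) (Or.inl hs), pv_addM_skip _ n 1 (S1 + a) (Or.inl hs),
        pv_addM_merge _ _ _ _ _ hW (le_of_lt hw)]
  by_cases hW0 : W = 0
  · obtain ⟨h1, h2⟩ := h0 hW0
    subst hW0 h1 h2
    rw [pv_A3_zero]
    unfold pvA3
    simp only [zero_add]
  -- W > 0
  have hWpos : 0 < W := by omega
  have hkW2 : PySem.Str.strip ((some pvWB).getD "") ++ " T" ++ PySem.Int.toStr 1 ≠
      PySem.Str.strip (n.getD "") ++ " T" ++ PySem.Int.toStr 2 := by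
    rw [hsw]; exact pv_key_ne_12 _ _
  have hWne : PySem.Str.strip ((some pvWB).getD "") ≠ "" := by decide
  have hcW0 : (pvAddMaterial PySem.Dict.empty (some pvWB) 1 W).contains
      (PySem.Str.strip ((some pvWB).getD "") ++ " T" ++ PySem.Int.toStr 1) = true := by
    rw [pv_addM_ins _ _ _ _ hWne hWpos, PySem.Dict.contains_insert]; simp
  by_cases hsW : PySem.Str.strip (n.getD "") = pvWB
  · -- the T1 adds of the main name hit the workbook key: everything at that key merges
    have hcong : ∀ (d : PySem.Dict String Int) (v : Int),
        pvAddMaterial d n 1 v = pvAddMaterial d (some pvWB) 1 v := by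
      intro d v; unfold pvAddMaterial; rw [hsW, hsw]
    have hc1 : (pvAddMaterial (pvAddMaterial PySem.Dict.empty (some pvWB) 1 W) (some pvWB) 1 S1).contains
        (PySem.Str.strip ((some pvWB).getD "") ++ " T" ++ PySem.Int.toStr 1) = true :=
      pv_addM_contains _ _ _ _ _ hcW0
    have hc2 : (pvAddMaterial (pvAddMaterial (pvAddMaterial PySem.Dict.empty (some pvWB) 1 W)
          (some pvWB) 1 S1) (some pvWB) 1 w).contains
        (PySem.Str.strip ((some pvWB).getD "") ++ " T" ++ PySem.Int.toStr 1) = true :=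
      pv_addM_contains _ _ _ _ _ hc1
    unfold pvA3
    rw [hcong _ S1, hcong _ a, hcong _ (S1 + a)]
    rw [← pv_addM_comm _ (some pvWB) n 1 2 w S2 hkW2 hc1,
        ← pv_addM_comm _ (some pvWB) n 1 2 a S2 hkW2 hc2,
        pv_addM_merge _ _ _ _ _ hW hS1,
        pv_addM_merge _ _ _ _ _ (by omega) (le_of_lt hw),
        pv_addM_merge _ _ _ _ _ (by omega) ha,
        pv_addM_merge _ _ _ _ _ hS2 hb,
        pv_addM_merge _ _ _ _ _ (by omega : (0:Int) ≤ W + w) (by omega : (0:Int) ≤ S1 + a)]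
    have e : W + S1 + w + a = W + w + (S1 + a) := by ring
    rw [e]
  · have hkW1 : PySem.Str.strip ((some pvWB).getD "") ++ " T" ++ PySem.Int.toStr 1 ≠
        PySem.Str.strip (n.getD "") ++ " T" ++ PySem.Int.toStr 1 := by
      rw [hsw]; intro h
      have h' := (String.append_left_inj (PySem.Int.toStr 1)).mp h
      exact hsW ((String.append_left_inj " T").mp h').symm
    have hc1 : (pvAddMaterial (pvAddMaterial PySem.Dict.empty (some pvWB) 1 W) n 1 S1).contains
        (PySem.Str.strip ((some pvWB).getD "") ++ " T" ++ PySem.Int.toStr 1) = true :=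
      pv_addM_contains _ _ _ _ _ hcW0
    unfold pvA3
    rw [← pv_addM_comm _ (some pvWB) n 1 2 w S2 hkW2 hc1,
        ← pv_addM_comm _ (some pvWB) n 1 1 w S1 hkW1 hcW0,
        pv_addM_merge _ _ _ _ _ hW (le_of_lt hw)]
    by_cases ha0 : a = 0
    · subst ha0
      rw [pv_addM_skip _ n 1 0 (Or.inr le_rfl), add_zero,
          pv_addM_merge _ _ _ _ _ hS2 hb]
    · have hS20 := hx (by omega)
      subst hS20
      rw [pv_addM_skip _ n 2 0 (Or.inr le_rfl), zero_add,
          pv_addM_merge _ _ _ _ _ hS1 ha]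

-- the main invariant: folding A's step over phased rows from B's shape stays in B's shape
theorem pv_foldL (n : Option String) (rows : List (PySem.Dict String Int)) :
    ∀ (C W S1 S2 : Int), pvPhased rows = true → 0 ≤ W → 0 ≤ S1 → 0 ≤ S2 →
    (W = 0 → S1 = 0 ∧ S2 = 0) → (0 < S2 → rows.all (fun r' => pvAv r' == 0) = true) →
    List.foldl (pvStep n) (C, pvA3 n W S1 S2) rows
      = (C + (rows.map pvCr).sum,
         pvA3 n (W + (rows.map pvWv).sum) (S1 + (rows.map pvAv).sum) (S2 + (rows.map pvBv).sum)) := by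
  induction rows with
  | nil => intro C W S1 S2 _ _ _ _ _ _; simp
  | cons r rest ih =>
    intro C W S1 S2 hp hW hS1 hS2 h0 hS2all
    have hp' := hp
    simp only [pvPhased, Bool.and_eq_true, Bool.or_eq_true, Bool.not_eq_eq_eq_not, Bool.not_true,
      decide_eq_true_eq, decide_eq_false_iff_not, not_lt] at hp'
    obtain ⟨⟨⟨⟨hw, ha⟩, hb⟩, hphase⟩, hrest⟩ := hp'
    rw [List.foldl_cons]
    have hxx : 0 < pvAv r → S2 = 0 := by
      intro hav
      by_contra hne
      have hS2pos : 0 < S2 := by omega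
      have := hS2all hS2pos
      simp only [List.all_cons, Bool.and_eq_true, beq_iff_eq] at this
      omega
    have hstep : pvStep n (C, pvA3 n W S1 S2) r
        = (C + pvCr r, pvA3 n (W + pvWv r) (S1 + pvAv r) (S2 + pvBv r)) := by
      unfold pvStep
      rw [pv_stepA3 n W S1 S2 _ _ _ hw hW hS1 hS2 ha hb h0 hxx]
    rw [hstep, ih (C + pvCr r) (W + pvWv r) (S1 + pvAv r) (S2 + pvBv r) hrest
        (by omega) (by omega) (by omega) (by intro h; omega)
        (by
          intro hpos
          by_cases hbp : 0 < pvBv r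
          · rcases hphase with hph | hph
            · omega
            · exact hph
          · have hS2pos : 0 < S2 := by omega
            have := hS2all hS2pos
            simp only [List.all_cons, Bool.and_eq_true] at this
            exact this.2)]
    simp [add_assoc]

theorem pv_phased_table : pvPhased (pvTable.drop 1) = true := by decide

theorem pv_phased_drop (rows : List (PySem.Dict String Int)) (m : Nat) (h : pvPhased rows = true) :
    pvPhased (rows.drop m) = true := by
  induction rows generalizing m with
  | nil => simp [pvPhased]
  | cons r rest ih =>
    cases m with
    | zero => exact h
    | succ m' =>
      simp only [List.drop_succ_cons]
      apply ih
      simp only [pvPhased, Bool.and_eq_true] at h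
      exact h.2

theorem pv_phased_take (rows : List (PySem.Dict String Int)) (m : Nat) (h : pvPhased rows = true) :
    pvPhased (rows.take m) = true := by
  induction rows generalizing m with
  | nil => simp [h]
  | cons r rest ih =>
    cases m with
    | zero => simp [pvPhased]
    | succ m' =>
      simp only [List.take_succ_cons]
      simp only [pvPhased, Bool.and_eq_true] at h ⊢
      refine ⟨⟨h.1.1, ?_⟩, ih m' h.2⟩
      rcases Bool.or_eq_true _ _ |>.mp h.1.2 with hno | hall
      · exact Bool.or_eq_true _ _ |>.mpr (Or.inl hno)
      · refine Bool.or_eq_true _ _ |>.mpr (Or.inr ?_)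
        rw [List.all_eq_true] at hall ⊢
        intro x hx
        exact hall x (List.mem_of_mem_take hx)

-- A's range loop with table lookups is the row fold over the corresponding slice
theorem pv_fold_range (n : Option String) (k : Nat) :
    ∀ (lo : Nat) (init : Int × PySem.Dict String Int), lo + k ≤ pvTable.length →
    List.foldl
      (fun st level =>
        match PySem.List.pyGet? pvTable level with
        | none => st
        | some row =>
          (st.1 + row.getD "credits" 0,
           pvAddMaterial (pvAddMaterial (pvAddMaterial st.2 (some pvWB) 1 (row.getD "workbook" 0))
             n 1 (row.getD "main_t1" 0)) n 2 (row.getD "main_t2" 0)))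
      init (PySem.List.pyRange (lo : Int) ((lo : Int) + (k : Int)) 1)
    = List.foldl (pvStep n) init ((pvTable.drop lo).take k) := by
  induction k with
  | zero =>
    intro lo init _
    rw [PySem.List.pyRange_one_eq_nil (by omega)]
    simp
  | succ k' ih =>
    intro lo init hlen
    have hlo : lo < pvTable.length := by omega
    rw [PySem.List.pyRange_one_cons (by push_cast; omega)]
    rw [List.foldl_cons]
    have hrow : PySem.List.pyGet? pvTable (lo : Int) = some pvTable[lo] := by
      rw [PySem.List.pyGet?_natCast]
      exact List.getElem?_eq_getElem hlo
    have hbound : ((lo : Int) + 1) = ((lo + 1 : Nat) : Int) := by push_cast; ring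
    have hbound2 : ((lo : Int) + ((k' + 1 : Nat) : Int)) = (((lo + 1 : Nat)) : Int) + ((k' : Nat) : Int) := by
      push_cast; ring
    rw [hbound, hbound2, ih (lo + 1) _ (by omega)]
    rw [List.drop_eq_getElem_cons hlo, List.take_succ_cons, List.foldl_cons]
    congr 1
    rw [hrow]
    rfl

-- prefix table values are sums of initial segments of the table
theorem pv_prefix_spec (i : Nat) (h : i ≤ 26) :
    (PySem.List.pyGet? (pvPrefix "credits") (i : Int)).getD 0 = ((pvTable.take i).map pvCr).sum ∧
    (PySem.List.pyGet? (pvPrefix "workbook") (i : Int)).getD 0 = ((pvTable.take i).map pvWv).sum ∧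
    (PySem.List.pyGet? (pvPrefix "main_t1") (i : Int)).getD 0 = ((pvTable.take i).map pvAv).sum ∧
    (PySem.List.pyGet? (pvPrefix "main_t2") (i : Int)).getD 0 = ((pvTable.take i).map pvBv).sum := by
  interval_cases i <;> exact ⟨by decide, by decide, by decide, by decide⟩

-- ===== VERDICT (by name: the statement is the Claim_ definition above) =====
theorem calculate_single_stat_cost_py_spec : Claim_equal_calculate_single_stat_cost_py := by
  intro n cl tl _
  unfold Spec_calculate_single_stat_cost_py
  simp only [calculate_single_stat_cost_py, calculate_single_stat_cost_py_alt]
  have hL : ((pvTable.length : Nat) : Int) - 1 = 25 := by norm_num [pvTable]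
  rw [hL]
  generalize hc : min (max cl 0) 25 = c
  generalize ht : min (max tl c) 25 = t
  have hc0 : 0 ≤ c := by omega
  have hct : c ≤ t := by omega
  have ht25 : t ≤ 25 := by omega
  obtain ⟨lo, hlo⟩ : ∃ lo : Nat, (lo : Int) = c + 1 := ⟨(c + 1).toNat, by omega⟩
  obtain ⟨k, hk⟩ : ∃ k : Nat, (k : Int) = t - c := ⟨(t - c).toNat, by omega⟩
  have hlen : pvTable.length = 26 := by rfl
  have hbound : lo + k ≤ pvTable.length := by rw [hlen]; omega
  have hi : t + 1 = (lo : Int) + (k : Int) := by omega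
  have hi' : (lo : Int) + (k : Int) = ((lo + k : Nat) : Int) := by push_cast; ring
  rw [show c + 1 = ((lo : Nat) : Int) from hlo.symm, hi]
  rw [pv_fold_range n k lo ((0 : Int), PySem.Dict.empty) hbound]
  rw [show (PySem.Dict.empty : PySem.Dict String Int) = pvA3 n 0 0 0 from (pv_A3_zero n).symm]
  have hlo1 : 1 ≤ lo := by omega
  have hdropemb : pvTable.drop lo = (pvTable.drop 1).drop (lo - 1) := by
    rw [List.drop_drop]; congr 1; omega
  have hph : pvPhased ((pvTable.drop lo).take k) = true := by
    rw [hdropemb]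
    exact pv_phased_take _ k (pv_phased_drop _ (lo - 1) pv_phased_table)
  rw [pv_foldL n ((pvTable.drop lo).take k) 0 0 0 0 hph le_rfl le_rfl le_rfl
      (fun _ => ⟨rfl, rfl⟩) (fun h => absurd h (lt_irrefl 0))]
  rw [hi']
  obtain ⟨e1, e2, e3, e4⟩ := pv_prefix_spec lo (by omega)
  obtain ⟨f1, f2, f3, f4⟩ := pv_prefix_spec (lo + k) (by omega)
  rw [e1, e2, e3, e4, f1, f2, f3, f4]
  have hsum : ∀ f : PySem.Dict String Int → Int,
      ((pvTable.take (lo + k)).map f).sum - ((pvTable.take lo).map f).sum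
        = (((pvTable.drop lo).take k).map f).sum := by
    intro f
    rw [List.take_add, List.map_append, List.sum_append]
    ring
  rw [hsum pvCr, hsum pvWv, hsum pvAv, hsum pvBv]
  simp only [zero_add]
  rw [pv_A3_zero n]
  rfl
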